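-- pv_equiv track=rewrite | github.com/keiredin/leetcode | 2171-removing-minimum-number-of-magic-beans/2171-removing-minimum-number-of-magic-beans.py | minimumRemoval
-- ===== SOURCE A (Python) =====
-- from typing import List
--
-- def minimumRemoval(beans: List[int]) -> int:
--     beans.sort()
--     n = len(beans)
--     prefix = [*beans]
--
--
--
--     for i in range(1,n):
--         prefix[i] += prefix[i-1]
--
--     res = (prefix[-1] - prefix[0]) - ((n-1) * beans[0])
--
--     for i in range(1,n):
--         leftSum = prefix[i-1]
--         rightSum = prefix[-1] - prefix[i]
--         rightSum -= (n-1-i) * beans[i]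
--
--         res = min(res, rightSum + leftSum)
--
--     return res
-- ===== SOURCE B (Python) =====
-- from typing import List
--
-- def minimumRemoval(beans: List[int]) -> int:
--     beans.sort()
--     n = len(beans)
--     total = sum(beans)
--     best = max((n - i) * b for i, b in enumerate(beans))
--     return total - best
-- ===== Notes on version B (the rewrite author's own statement) =====
-- stated objective: simpler
-- what changed: Replaces the prefix-sum array and the left-sum/right-sum split with a single pass that keeps only a running maximum of beans[i]*(n-i) (the most beans keepable) and returns total minus it; one generator pass, no O(n) auxiliary array.
-- outside the precondition, e.g. on minimumRemoval([]): A raises IndexError, B raises ValueError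
import Mathlib
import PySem

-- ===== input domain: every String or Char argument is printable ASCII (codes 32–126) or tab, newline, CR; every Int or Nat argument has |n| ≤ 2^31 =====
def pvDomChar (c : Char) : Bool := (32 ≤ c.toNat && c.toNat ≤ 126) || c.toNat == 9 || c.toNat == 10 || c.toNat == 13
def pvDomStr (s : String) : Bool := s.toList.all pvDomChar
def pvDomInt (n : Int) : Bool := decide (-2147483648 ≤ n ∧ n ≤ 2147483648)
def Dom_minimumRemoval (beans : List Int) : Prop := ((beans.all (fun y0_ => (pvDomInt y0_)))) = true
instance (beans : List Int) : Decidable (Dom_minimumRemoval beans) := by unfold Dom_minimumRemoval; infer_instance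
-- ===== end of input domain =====

-- B drops A's prefix-sum array and left/right-sum split: it keeps one running maximum of
-- beans[i]*(n-i) over the sorted list and returns total - max (simpler, O(1) extra space).
-- Note: A sorts `beans` in place (B does the same); the equivalence proved is about the return value.


-- ===== PORT A =====
def minimumRemoval (beans : List Int) : Int :=
  let s := PySem.List.sorted beans (fun x => x)
  let n : Int := s.length
  let pre := (PySem.List.pyRange 1 n).foldl
      (fun p i => p.set i.toNat (PySem.List.pyGetD p i 0 + PySem.List.pyGetD p (i-1) 0)) s
  let res := (PySem.List.pyGetD pre (-1) 0 - PySem.List.pyGetD pre 0 0)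
               - (n - 1) * PySem.List.pyGetD s 0 0
  (PySem.List.pyRange 1 n).foldl (fun res i =>
      let leftSum := PySem.List.pyGetD pre (i-1) 0
      let rightSum := PySem.List.pyGetD pre (-1) 0 - PySem.List.pyGetD pre i 0
      let rightSum := rightSum - (n - 1 - i) * PySem.List.pyGetD s i 0
      min res (rightSum + leftSum)) res

def minimumRemoval_alt (beans : List Int) : Int :=
  let s := PySem.List.sorted beans (fun x => x)
  let n : Int := s.length
  let total := s.sum
  let best := (PySem.List.max? ((PySem.List.enumerate s).map
                 (fun p => (n - p.1) * p.2)) (fun x => x)).getD 0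
  total - best

-- ===== PRECONDITION & SPEC =====
-- Pre_ excludes only the empty list, on which A raises IndexError (prefix[-1]) and B raises ValueError (max of an empty sequence).
def Pre_minimumRemoval (beans : List Int) : Prop := beans ≠ []
instance (beans : List Int) : Decidable (Pre_minimumRemoval beans) := by unfold Pre_minimumRemoval; infer_instance
def pvWitness_minimumRemoval : List Int := [5, 1, 4, 1]

def Spec_minimumRemoval (beans : List Int) (out : Int) : Prop := out = minimumRemoval_alt beans
instance (beans : List Int) (out : Int) : Decidable (Spec_minimumRemoval beans out) := by unfold Spec_minimumRemoval; infer_instance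

-- ===== CLAIM (what is proved, stated in full; the proofs are below) =====
def Claim_equal_minimumRemoval : Prop := ∀ (beans : List Int), Dom_minimumRemoval beans → Pre_minimumRemoval beans → Spec_minimumRemoval beans (minimumRemoval beans)

-- ===== LEMMAS AND PROOFS =====
theorem pyGetD_neg_one (xs : List Int) (h : xs ≠ []) :
    PySem.List.pyGetD xs (-1) 0 = xs.getD (xs.length - 1) 0 := by
  have hl : 1 ≤ xs.length := List.length_pos_iff.mpr h
  simp [PySem.List.pyGetD, PySem.List.pyGet?, PySem.List.pyIdx?, hl]

theorem take_succ_sum (s : List Int) (j : Nat) (hj : j < s.length) :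
    (s.take (j+1)).sum = (s.take j).sum + s.getD j 0 := by
  rw [List.take_add_one, List.sum_append, List.getD_eq_getElem s 0 hj,
      List.getElem?_eq_getElem hj]
  simp

theorem prefix_spec (s : List Int) (k : Nat) (hk : k ≤ s.length) :
    ((PySem.List.pyRange 1 (k:Int)).foldl
      (fun p i => p.set i.toNat (PySem.List.pyGetD p i 0 + PySem.List.pyGetD p (i-1) 0)) s).length = s.length ∧
    ∀ j : Nat, j < s.length →
      ((PySem.List.pyRange 1 (k:Int)).foldl
        (fun p i => p.set i.toNat (PySem.List.pyGetD p i 0 + PySem.List.pyGetD p (i-1) 0)) s).getD j 0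
        = if j < k then (s.take (j+1)).sum else s.getD j 0 := by
  induction k with
  | zero =>
      rw [PySem.List.pyRange_one_eq_nil (by norm_num)]
      simp
  | succ k ih =>
      match k, ih with
      | 0, _ =>
          rw [show ((0+1:Nat):Int) = (1:Int) by norm_num,
              PySem.List.pyRange_one_eq_nil le_rfl]
          refine ⟨rfl, ?_⟩
          intro j hj
          match j with
          | 0 =>
              obtain ⟨a, t, rfl⟩ := List.exists_cons_of_ne_nil (List.ne_nil_of_length_pos hj)
              simp
          | j+1 => simp
      | m+1, ih =>
          obtain ⟨hlen, hval⟩ := ih (le_trans (Nat.le_succ _) hk)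
          set k := m + 1
          have hk1 : (1:Int) ≤ (k:Int) := by exact_mod_cast Nat.one_le_iff_ne_zero.mpr (by omega)
          rw [show (((k+1:Nat)):Int) = (k:Int)+1 by push_cast; omega,
              PySem.List.pyRange_one_succ_right hk1, List.foldl_append]
          set q := ((PySem.List.pyRange 1 (k:Int)).foldl
            (fun p i => p.set i.toNat (PySem.List.pyGetD p i 0 + PySem.List.pyGetD p (i-1) 0)) s) with hq
          simp only [List.foldl_cons, List.foldl_nil]
          have hkl : k < s.length := by omega
          have e1 : PySem.List.pyGetD q (k:Int) 0 = s.getD k 0 := by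
            rw [PySem.List.pyGetD_natCast, hval k hkl]; simp
          have e2 : PySem.List.pyGetD q ((k:Int)-1) 0 = (s.take k).sum := by
            rw [show (k:Int)-1 = ((m:Nat):Int) by omega, PySem.List.pyGetD_natCast,
                hval m (by omega), if_pos (by omega)]
          have htk : ((k:Int)).toNat = k := by simp
          rw [e1, e2, htk]
          constructor
          · rw [List.length_set, hlen]
          · intro j hj
            have hjq : j < q.length := by rw [hlen]; exact hj
            rw [List.getD_eq_getElem _ 0 (by rw [List.length_set]; exact hjq),
                List.getElem_set]
            by_cases hjk : k = j
            · subst hjk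
              rw [if_pos rfl, if_pos (by omega), take_succ_sum s k hkl]
              ring
            · rw [if_neg hjk, ← List.getD_eq_getElem q 0 hjq, hval j hj]
              by_cases hlt : j < k
              · rw [if_pos hlt, if_pos (by omega)]
              · rw [if_neg hlt, if_neg (by omega)]

theorem min_fold (L : List Int) (g : Int → Int) (t c : Int) :
    L.foldl (fun r i => min r (t - g i)) (t - c) = t - L.foldl (fun m i => max m (g i)) c := by
  induction L generalizing c with
  | nil => rfl
  | cons x xs ih =>
      simp only [List.foldl_cons]
      rw [show min (t - c) (t - g x) = t - max c (g x) by omega, ih]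

theorem a_eq_b (beans : List Int) (hpre : beans ≠ []) :
    minimumRemoval beans = minimumRemoval_alt beans := by
  simp only [minimumRemoval, minimumRemoval_alt]
  set s := PySem.List.sorted beans (fun x => x) with hs
  have hsne : s ≠ [] := by
    rw [hs, Ne, PySem.List.sorted_eq_nil_iff]; exact hpre
  have hn : 1 ≤ s.length := List.length_pos_iff.mpr hsne
  obtain ⟨hlen, hval0⟩ := prefix_spec s s.length le_rfl
  set q := ((PySem.List.pyRange 1 (s.length:Int)).foldl
      (fun p i => p.set i.toNat (PySem.List.pyGetD p i 0 + PySem.List.pyGetD p (i-1) 0)) s) with hqdef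
  have hval : ∀ j : Nat, j < s.length → q.getD j 0 = (s.take (j+1)).sum := by
    intro j hj; rw [hval0 j hj, if_pos hj]
  have hqne : q ≠ [] := by
    intro h; rw [h] at hlen; exact absurd hlen.symm (by simpa using Nat.one_le_iff_ne_zero.mp hn)
  have pm1 : PySem.List.pyGetD q (-1) 0 = s.sum := by
    rw [pyGetD_neg_one q hqne, hlen, hval (s.length-1) (by omega),
        show s.length - 1 + 1 = s.length by omega, List.take_length]
  have s0 : (s.take 1).sum = s.getD 0 0 := by
    obtain ⟨a, t, h⟩ := List.exists_cons_of_ne_nil hsne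
    rw [h]; simp
  have p0 : PySem.List.pyGetD q 0 0 = s.getD 0 0 := by
    rw [PySem.List.pyGetD_of_nonneg q 0 le_rfl, Int.toNat_zero, hval 0 (by omega), s0]
  have sg0 : PySem.List.pyGetD s 0 0 = s.getD 0 0 := by
    rw [PySem.List.pyGetD_of_nonneg s 0 le_rfl, Int.toNat_zero]
  rw [pm1, p0]
  have hcongr : ∀ (acc x : Int), x ∈ PySem.List.pyRange 1 (s.length:Int) →
      min acc (s.sum - PySem.List.pyGetD q x 0 - ((s.length:Int) - 1 - x) * PySem.List.pyGetD s x 0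
        + PySem.List.pyGetD q (x - 1) 0)
      = (fun (r i : Int) => min r (s.sum - ((s.length:Int) - i) * PySem.List.pyGetD s i 0)) acc x := by
    intro acc i hi
    obtain ⟨h1, h2⟩ := PySem.List.mem_pyRange_one.mp hi
    have hji : ((i.toNat:Nat):Int) = i := by omega
    have hjl : i.toNat < s.length := by omega
    have e1 : PySem.List.pyGetD q (i-1) 0 = (s.take i.toNat).sum := by
      rw [show i - 1 = ((i.toNat - 1 : Nat):Int) by omega, PySem.List.pyGetD_natCast,
          hval (i.toNat - 1) (by omega), show i.toNat - 1 + 1 = i.toNat by omega]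
    have e2 : PySem.List.pyGetD q i 0 = (s.take i.toNat).sum + s.getD i.toNat 0 := by
      rw [← hji, PySem.List.pyGetD_natCast, hval i.toNat hjl, take_succ_sum s i.toNat hjl,
          Int.toNat_natCast]
    have e3 : PySem.List.pyGetD s i 0 = s.getD i.toNat 0 := by
      rw [← hji, PySem.List.pyGetD_natCast, Int.toNat_natCast]
    simp only [e1, e2, e3]
    congr 1
    ring
  rw [PySem.List.foldl_congr_mem _ _
      (fun (r i : Int) => min r (s.sum - ((s.length:Int) - i) * PySem.List.pyGetD s i 0)) _ hcongr]
  rw [show s.sum - s.getD 0 0 - ((s.length:Int) - 1) * PySem.List.pyGetD s 0 0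
      = s.sum - ((s.length:Int) - 0) * PySem.List.pyGetD s 0 0 by rw [sg0]; ring]
  rw [min_fold (PySem.List.pyRange 1 (s.length:Int))
      (fun i => ((s.length:Int) - i) * PySem.List.pyGetD s i 0) s.sum
      (((s.length:Int) - 0) * PySem.List.pyGetD s 0 0)]
  -- B side
  rw [PySem.List.enumerate_eq_map_pyRange s 0, List.map_map]
  have hlen' : PySem.List.len s = (s.length:Int) := by simp [PySem.List.len]
  rw [hlen', PySem.List.pyRange_one_cons (by exact_mod_cast hn : (0:Int) < (s.length:Int))]
  simp only [List.map_cons, PySem.List.max?_id_cons, Option.getD_some, Function.comp]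
  rw [List.foldl_map]
  norm_num [Function.comp]

-- ===== VERDICT (by name: the statement is the Claim_ definition above) =====
theorem minimumRemoval_spec : Claim_equal_minimumRemoval := by
  intro beans _ hpre
  exact a_eq_b beans hpre
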